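-- pv_equiv track=rewrite | github.com/selotape/katas | katas/update_jet_catalog.py | best_price
-- ===== SOURCE A (Python) =====
-- def best_price(seller_ids, all_sellers):
--     item_ids = range(len(all_sellers[0]))
--     relevant_sellers = {all_sellers[seller_id] for seller_id in seller_ids}
--     price = 0
--     for item in item_ids:
--         prices = (seller[item] for seller in relevant_sellers if seller[item] >= 0)
--         price += min(prices)
--     return price
-- ===== SOURCE B (Python) =====
-- def best_price(seller_ids, all_sellers):
--     n = len(all_sellers[0])
--
--     def merge(a, b):
--         return [x if 0 <= x and (y < 0 or x <= y) else y for x, y in zip(a, b)]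
--
--     def tournament(lo, hi):
--         if hi - lo == 1:
--             return all_sellers[seller_ids[lo]][:n]
--         mid = (lo + hi) // 2
--         return merge(tournament(lo, mid), tournament(mid, hi))
--
--     if not seller_ids:
--         return 0
--     return sum(tournament(0, len(seller_ids)))
-- ===== Notes on version B (the rewrite author's own statement) =====
-- stated objective: alternative
-- what changed: Replaces A's item-major pass (a min() over a filtered scan of the deduplicated sellers for each item) by a divide-and-conquer tournament: the selected sellers are recursively halved and pairs of price rows are merged elementwise by a nonnegative-preferring min, and the single resulting best row is summed; Pre_ excludes exactly the inputs where A raises (empty catalog, seller id out of range, a selected row shorter than the first, or an item with no nonnegative price among the selected sellers).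
import Mathlib
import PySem

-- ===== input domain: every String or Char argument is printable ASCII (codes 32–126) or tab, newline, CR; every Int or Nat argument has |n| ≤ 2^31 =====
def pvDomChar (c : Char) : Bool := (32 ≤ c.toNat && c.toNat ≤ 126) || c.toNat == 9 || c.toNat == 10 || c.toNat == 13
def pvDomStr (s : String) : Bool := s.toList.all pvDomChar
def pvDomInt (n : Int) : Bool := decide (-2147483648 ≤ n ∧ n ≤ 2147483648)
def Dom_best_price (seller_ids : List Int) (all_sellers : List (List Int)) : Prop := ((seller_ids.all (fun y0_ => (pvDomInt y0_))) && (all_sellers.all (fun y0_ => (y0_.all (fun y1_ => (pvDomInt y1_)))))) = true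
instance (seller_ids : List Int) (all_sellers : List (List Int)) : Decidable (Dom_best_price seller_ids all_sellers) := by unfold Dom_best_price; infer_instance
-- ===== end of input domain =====

-- B replaces A's item-major min() scans by a divide-and-conquer tournament that merges price
-- rows pairwise (nonnegative-preferring elementwise min) and sums the single resulting row.


-- ===== PORT A =====
def best_price (seller_ids : List Int) (all_sellers : List (List Int)) : Int :=
  match PySem.List.pyGet? all_sellers 0 with
  | none => 0
  | some row0 =>
    let item_ids := List.range row0.length
    let relevant_sellers : PySem.Set (List Int) :=
      PySem.Set.ofList (seller_ids.map (fun sid => (PySem.List.pyGet? all_sellers sid).getD []))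
    item_ids.foldl (fun (price : Int) (item : Nat) =>
      let prices := relevant_sellers.filterMap (fun (seller : List Int) =>
        match PySem.List.pyGet? seller ((item : Nat) : Int) with
        | none => none
        | some p => if 0 ≤ p then some p else none)
      price + (PySem.List.min? prices (fun x => x)).getD 0) 0

-- ===== PORT B =====
-- merge(a, b): elementwise, keep x when x is a valid (nonnegative) price and y is not or x ≤ y
def bp_merge (a b : List Int) : List Int :=
  List.zipWith (fun x y => if 0 ≤ x ∧ (y < 0 ∨ x ≤ y) then x else y) a b

-- tournament(lo, hi) over seller_ids[lo:hi]; Python's base test is `hi - lo == 1` and it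
-- diverges for hi ≤ lo, a case best_price_alt never produces (the port returns the base there)
def bp_tournament (seller_ids : List Int) (all_sellers : List (List Int)) (n : Nat) (lo hi : Nat) : List Int :=
  if hi - lo ≤ 1 then
    ((PySem.List.pyGet? all_sellers ((PySem.List.pyGet? seller_ids ((lo : Nat) : Int)).getD 0)).getD []).take n
  else
    bp_merge (bp_tournament seller_ids all_sellers n lo ((lo + hi) / 2))
             (bp_tournament seller_ids all_sellers n ((lo + hi) / 2) hi)
termination_by hi - lo
decreasing_by all_goals omega

def best_price_alt (seller_ids : List Int) (all_sellers : List (List Int)) : Int :=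
  match PySem.List.pyGet? all_sellers 0 with
  | none => 0
  | some row0 =>
    let n := row0.length
    if seller_ids.isEmpty then 0
    else (bp_tournament seller_ids all_sellers n 0 seller_ids.length).sum

-- ===== PRECONDITION & SPEC =====
-- Pre_ admits exactly the inputs on which Python A returns (rows passed as hashable tuples):
-- it excludes an empty all_sellers (IndexError), a seller id out of range (IndexError), a
-- selected row shorter than the first row (IndexError on seller[item]), and a first-row item
-- with no nonnegative price among the selected sellers (ValueError from min of an empty
-- sequence); note that CPython additionally raises TypeError whenever the rows are passed as
-- (unhashable) lists, a distinction List (List Int) cannot express.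
def Pre_best_price (seller_ids : List Int) (all_sellers : List (List Int)) : Prop :=
  all_sellers ≠ [] ∧
  (∀ sid ∈ seller_ids, -(all_sellers.length : Int) ≤ sid ∧ sid < all_sellers.length) ∧
  (∀ sid ∈ seller_ids, (all_sellers.headD []).length ≤ ((PySem.List.pyGet? all_sellers sid).getD []).length) ∧
  (∀ item ∈ List.range (all_sellers.headD []).length,
    ∃ sid ∈ seller_ids, 0 ≤ ((PySem.List.pyGet? all_sellers sid).getD []).getD item (-1))
instance (seller_ids : List Int) (all_sellers : List (List Int)) : Decidable (Pre_best_price seller_ids all_sellers) := by unfold Pre_best_price; infer_instance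
def pvWitness_best_price : List Int × List (List Int) := ([0, 1], [[3, -1], [2, 4]])

def Spec_best_price (seller_ids : List Int) (all_sellers : List (List Int)) (out : Int) : Prop := out = best_price_alt seller_ids all_sellers
instance (seller_ids : List Int) (all_sellers : List (List Int)) (out : Int) : Decidable (Spec_best_price seller_ids all_sellers out) := by unfold Spec_best_price; infer_instance

-- ===== CLAIM (what is proved, stated in full; the proofs are below) =====
def Claim_equal_best_price : Prop := ∀ (seller_ids : List Int) (all_sellers : List (List Int)), Dom_best_price seller_ids all_sellers → Pre_best_price seller_ids all_sellers → Spec_best_price seller_ids all_sellers (best_price seller_ids all_sellers)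

-- ===== LEMMAS AND PROOFS =====
-- Vocabulary: pvF is merge's scalar operation, pvOpt reads a price as an optional valid price,
-- pvOmin is min on optional prices. pvF is associative, so the tournament equals a left fold
-- of merge over the selected rows (pv_tournament_eq); pvOpt turns pvF-folds into pvOmin-folds
-- (pv_opt_foldl), which both A's per-item min() (pv_minFold_eq_min?) and B's merged row reduce
-- to — and which only depend on which prices occur (pv_minFold_congr), so A's dedup of rows by
-- value is invisible.

def pvF (x y : Int) : Int := if 0 ≤ x ∧ (y < 0 ∨ x ≤ y) then x else y

def pvOpt (x : Int) : Option Int := if 0 ≤ x then some x else none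

def pvOmin : Option Int → Option Int → Option Int
  | none, b => b
  | some a, none => some a
  | some a, some b => some (min a b)

def pvPriceAt (seller : List Int) (item : Nat) : Option Int :=
  match PySem.List.pyGet? seller ((item : Nat) : Int) with
  | none => none
  | some p => if 0 ≤ p then some p else none

def pvRowAt (seller_ids : List Int) (all_sellers : List (List Int)) (n : Nat) (k : Nat) : List Int :=
  ((PySem.List.pyGet? all_sellers ((PySem.List.pyGet? seller_ids ((k : Nat) : Int)).getD 0)).getD []).take n

def pvFold1 : List (List Int) → List Int
  | [] => []
  | h :: t => t.foldl bp_merge h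

theorem pvF_assoc (x y z : Int) : pvF (pvF x y) z = pvF x (pvF y z) := by
  unfold pvF; split_ifs <;> omega

theorem pvOpt_F (x y : Int) : pvOpt (pvF x y) = pvOmin (pvOpt x) (pvOpt y) := by
  by_cases hx : 0 ≤ x <;> by_cases hy : 0 ≤ y <;>
    simp only [pvOpt, pvF, pvOmin, hx, hy, if_true, if_false] <;> split_ifs <;>
    simp_all [min_def] <;> omega

theorem pv_merge_assoc (a : List Int) : ∀ (b c : List Int),
    bp_merge (bp_merge a b) c = bp_merge a (bp_merge b c) := by
  induction a with
  | nil => intro b c; rfl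
  | cons x a ih =>
    intro b c
    cases b with
    | nil => rfl
    | cons y b =>
      cases c with
      | nil => rfl
      | cons z c =>
        simp only [bp_merge, List.zipWith] at *
        refine congrArg₂ _ ?_ (ih b c)
        have := pvF_assoc x y z
        simpa [pvF] using this

theorem pv_merge_foldl_shift (l : List (List Int)) : ∀ (a b : List Int),
    bp_merge a (l.foldl bp_merge b) = l.foldl bp_merge (bp_merge a b) := by
  induction l with
  | nil => intro a b; rfl
  | cons h t ih => intro a b; rw [List.foldl_cons, List.foldl_cons, ih, pv_merge_assoc]

theorem pvFold1_append (l1 l2 : List (List Int)) (h1 : l1 ≠ []) (h2 : l2 ≠ []) :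
    pvFold1 (l1 ++ l2) = bp_merge (pvFold1 l1) (pvFold1 l2) := by
  cases l1 with
  | nil => exact absurd rfl h1
  | cons a t1 =>
    cases l2 with
    | nil => exact absurd rfl h2
    | cons b t2 =>
      show (t1 ++ b :: t2).foldl bp_merge a = _
      rw [List.foldl_append, List.foldl_cons]
      show _ = bp_merge (t1.foldl bp_merge a) (t2.foldl bp_merge b)
      rw [pv_merge_foldl_shift]

theorem pv_tournament_eq (ids : List Int) (als : List (List Int)) (n : Nat) :
    ∀ (d lo hi : Nat), hi - lo = d → lo < hi →
    bp_tournament ids als n lo hi = pvFold1 ((List.range' lo (hi - lo)).map (pvRowAt ids als n)) := by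
  intro d
  induction d using Nat.strong_induction_on with
  | _ d ih =>
    intro lo hi hd hlt
    rw [bp_tournament]
    by_cases hb : hi - lo ≤ 1
    · have h1 : hi - lo = 1 := by omega
      rw [if_pos hb, h1, List.range'_one, List.map_cons, List.map_nil]
      rfl
    · rw [if_neg hb]
      set mid := (lo + hi) / 2 with hm
      have hlom : lo < mid := by omega
      have hmh : mid < hi := by omega
      rw [ih (mid - lo) (by omega) lo mid rfl hlom,
          ih (hi - mid) (by omega) mid hi rfl hmh]
      have hsplit : List.range' lo (hi - lo) = List.range' lo (mid - lo) ++ List.range' mid (hi - mid) := by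
        have e := List.range'_append (s := lo) (m := mid - lo) (n := hi - mid) (step := 1)
        have e1 : lo + 1 * (mid - lo) = mid := by omega
        have e2 : (mid - lo) + (hi - mid) = hi - lo := by omega
        rw [e1, e2] at e
        exact e.symm
      rw [hsplit, List.map_append, pvFold1_append]
      · simp [List.range'_eq_nil_iff]; omega
      · simp [List.range'_eq_nil_iff]; omega

theorem pv_merge_getD (a b : List Int) (n i : Nat) (ha : a.length = n) (hb : b.length = n)
    (hi : i < n) : (bp_merge a b).getD i 0 = pvF (a.getD i 0) (b.getD i 0) := by
  have hl : i < (bp_merge a b).length := by simp [bp_merge, List.length_zipWith, ha, hb, hi]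
  rw [List.getD_eq_getElem _ _ hl, List.getD_eq_getElem _ _ (ha ▸ hi), List.getD_eq_getElem _ _ (hb ▸ hi)]
  simp [bp_merge, List.getElem_zipWith, pvF]

theorem pv_merge_length (a b : List Int) (n : Nat) (ha : a.length = n) (hb : b.length = n) :
    (bp_merge a b).length = n := by simp [bp_merge, List.length_zipWith, ha, hb]

theorem pv_foldl_merge_length (l : List (List Int)) : ∀ (a : List Int) (n : Nat),
    a.length = n → (∀ r ∈ l, r.length = n) → (l.foldl bp_merge a).length = n := by
  induction l with
  | nil => intro a n ha _; exact ha
  | cons h t ih =>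
    intro a n ha hl
    exact ih _ n (pv_merge_length a h n ha (hl h (by simp)))
      (fun r hr => hl r (by simp [hr]))

theorem pv_foldl_merge_getD (l : List (List Int)) : ∀ (a : List Int) (n i : Nat),
    a.length = n → (∀ r ∈ l, r.length = n) → i < n →
    (l.foldl bp_merge a).getD i 0 = l.foldl (fun acc r => pvF acc (r.getD i 0)) (a.getD i 0) := by
  induction l with
  | nil => intro a n i _ _ _; rfl
  | cons h t ih =>
    intro a n i ha hl hi
    rw [List.foldl_cons, List.foldl_cons,
      ih _ n i (pv_merge_length a h n ha (hl h (by simp))) (fun r hr => hl r (by simp [hr])) hi,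
      pv_merge_getD a h n i ha (hl h (by simp)) hi]

theorem pv_opt_foldl (l : List Int) : ∀ (x : Int),
    pvOpt (l.foldl pvF x) = l.foldl (fun acc p => pvOmin acc (pvOpt p)) (pvOpt x) := by
  induction l with
  | nil => intro x; rfl
  | cons h t ih => intro x; rw [List.foldl_cons, List.foldl_cons, ih, pvOpt_F]

theorem pv_foldl_omin_some (t : List (Option Int)) : ∀ (v : Int),
    t.foldl pvOmin (some v) = some ((t.filterMap id).foldl min v) := by
  induction t with
  | nil => intro v; simp
  | cons b t ih =>
    intro v
    cases b with
    | none => simpa [pvOmin] using ih v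
    | some w => simpa [pvOmin] using ih (min v w)

theorem pv_minFold_eq_min? (xs : List (Option Int)) :
    xs.foldl pvOmin none = PySem.List.min? (xs.filterMap id) (fun x => x) := by
  induction xs with
  | nil => simp [PySem.List.min?]
  | cons a t ih =>
    cases a with
    | none => simpa [pvOmin] using ih
    | some v =>
      rw [List.foldl_cons]
      show List.foldl pvOmin (some v) t = _
      rw [pv_foldl_omin_some]
      simp only [List.filterMap_cons, id]
      rw [PySem.List.min?_id_cons]

theorem pv_minFold_congr (xs ys : List (Option Int)) (h : ∀ o, o ∈ xs ↔ o ∈ ys) :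
    xs.foldl pvOmin none = ys.foldl pvOmin none := by
  rw [pv_minFold_eq_min?, pv_minFold_eq_min?]
  have hm : ∀ v : Int, v ∈ xs.filterMap id ↔ v ∈ ys.filterMap id := by
    intro v
    simp only [List.mem_filterMap, id]
    constructor
    · rintro ⟨a, ha, hav⟩; exact ⟨a, (h a).mp ha, hav⟩
    · rintro ⟨a, ha, hav⟩; exact ⟨a, (h a).mpr ha, hav⟩
  cases h1 : PySem.List.min? (xs.filterMap id) (fun x => x) with
  | none =>
    rw [PySem.List.min?_eq_none_iff] at h1
    symm; rw [PySem.List.min?_eq_none_iff]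
    rw [List.eq_nil_iff_forall_not_mem] at h1 ⊢
    intro v hv; exact h1 v ((hm v).mpr hv)
  | some m =>
    have hmem := PySem.List.min?_mem h1
    have hlb := PySem.List.min?_isMin h1
    cases h2 : PySem.List.min? (ys.filterMap id) (fun x => x) with
    | none =>
      rw [PySem.List.min?_eq_none_iff, List.eq_nil_iff_forall_not_mem] at h2
      exact absurd ((hm m).mp hmem) (h2 m)
    | some m2 =>
      have hmem2 := PySem.List.min?_mem h2
      have hlb2 := PySem.List.min?_isMin h2
      have h12 : m ≤ m2 := hlb m2 ((hm m2).mpr hmem2)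
      have h21 : m2 ≤ m := hlb2 m ((hm m).mp hmem)
      have : m = m2 := le_antisymm h12 h21
      rw [this]

theorem pv_foldl_addA (g : Nat → Int) (l : List Nat) : ∀ (a : Int),
    l.foldl (fun (price : Int) item => price + g item) a = a + (l.map g).sum := by
  induction l with
  | nil => intro a; simp
  | cons i t ih => intro a; simp [ih (a + g i)]; ring

theorem pv_sum_eq_range (l : List Int) :
    l.sum = ((List.range l.length).map (fun i => l.getD i 0)).sum := by
  refine congrArg List.sum ?_
  apply List.ext_getElem
  · simp
  · intro i h1 h2
    simp [List.getD_eq_getElem?_getD, List.getElem?_eq_getElem (by simpa using h2)]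

theorem pv_ports_eq (seller_ids : List Int) (all_sellers : List (List Int))
    (hpre : Pre_best_price seller_ids all_sellers) :
    best_price seller_ids all_sellers = best_price_alt seller_ids all_sellers := by
  obtain ⟨hne, hrange, hlen, hcol⟩ := hpre
  unfold best_price best_price_alt
  cases h0 : PySem.List.pyGet? all_sellers 0 with
  | none => rfl
  | some row0 =>
    simp only []
    set n := row0.length with hn
    have h0' : all_sellers[0]? = some row0 := by
      rw [show ((0 : Int)) = ((0 : Nat) : Int) by norm_num, PySem.List.pyGet?_natCast] at h0
      exact h0
    have hhead : all_sellers.headD [] = row0 := by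
      rw [List.headD_eq_head?_getD, List.head?_eq_getElem?, h0']; rfl
    -- notation for the full selected rows and the per-item option prices
    set rowF : Int → List Int := fun sid => (PySem.List.pyGet? all_sellers sid).getD [] with hrowF
    have hlen' : ∀ sid ∈ seller_ids, n ≤ (rowF sid).length := by
      intro sid hs; have := hlen sid hs; rwa [hhead] at this
    -- A as a sum over the items
    rw [pv_foldl_addA (g := fun item =>
      (PySem.List.min? ((PySem.Set.ofList (seller_ids.map rowF)).filterMap (fun (seller : List Int) =>
        match PySem.List.pyGet? seller ((item : Nat) : Int) with
        | none => none
        | some p => if 0 ≤ p then some p else none)) (fun x => x)).getD 0)]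
    rw [zero_add]
    -- the items' option prices, once per seller id
    have hitem : ∀ i : Nat, i < n →
        ∃ m : Int, (seller_ids.map (fun sid => pvPriceAt (rowF sid) i)).foldl pvOmin none = some m ∧
          (PySem.List.min? ((PySem.Set.ofList (seller_ids.map rowF)).filterMap (fun (seller : List Int) =>
            match PySem.List.pyGet? seller ((i : Nat) : Int) with
            | none => none
            | some p => if 0 ≤ p then some p else none)) (fun x => x)) = some m := by
      intro i hi
      have hA : (fun (seller : List Int) =>
          match PySem.List.pyGet? seller ((i : Nat) : Int) with
          | none => none
          | some p => if 0 ≤ p then some p else none) = fun s => pvPriceAt s i := rfl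
      have hsame : (PySem.List.min? ((PySem.Set.ofList (seller_ids.map rowF)).filterMap (fun (seller : List Int) =>
            match PySem.List.pyGet? seller ((i : Nat) : Int) with
            | none => none
            | some p => if 0 ≤ p then some p else none)) (fun x => x)) =
          (seller_ids.map (fun sid => pvPriceAt (rowF sid) i)).foldl pvOmin none := by
        rw [hA, ← Function.id_comp (fun s => pvPriceAt s i), ← List.filterMap_map, ← pv_minFold_eq_min?]
        apply pv_minFold_congr
        intro o
        simp only [List.mem_map, PySem.Set.mem_ofList]
        constructor
        · rintro ⟨r, hr, hro⟩
          obtain ⟨sid, hsid, hrow⟩ := hr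
          exact ⟨sid, hsid, by rw [hrow]; exact hro⟩
        · rintro ⟨sid, hsid, hro⟩
          exact ⟨rowF sid, ⟨sid, hsid, rfl⟩, hro⟩
      -- Pre_ guarantees the fold is some value
      obtain ⟨sid, hsid, hpos⟩ := hcol i (by rw [hhead]; exact List.mem_range.mpr hi)
      have hil : i < (rowF sid).length := lt_of_lt_of_le hi (hlen' sid hsid)
      have hgd : (rowF sid).getD i (-1) = (rowF sid)[i] := List.getD_eq_getElem _ _ hil
      have hp : pvPriceAt (rowF sid) i = some ((rowF sid)[i]) := by
        unfold pvPriceAt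
        rw [PySem.List.pyGet?_natCast, List.getElem?_eq_getElem hil]
        simp only []
        rw [if_pos (by rw [hgd] at hpos; exact hpos)]
      cases hf : (seller_ids.map (fun sid => pvPriceAt (rowF sid) i)).foldl pvOmin none with
      | some m => exact ⟨m, rfl, by rw [hsame, hf]⟩
      | none =>
        exfalso
        rw [pv_minFold_eq_min?, PySem.List.min?_eq_none_iff, List.eq_nil_iff_forall_not_mem] at hf
        exact hf ((rowF sid)[i]) (List.mem_filterMap.mpr
          ⟨some ((rowF sid)[i]), List.mem_map.mpr ⟨sid, hsid, hp⟩, rfl⟩)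
    by_cases hids : seller_ids.isEmpty
    · -- no sellers selected: Pre_ forces n = 0, both sides are 0
      rw [if_pos hids]
      have hn0 : n = 0 := by
        by_contra hne0
        obtain ⟨m, _, _⟩ := hitem 0 (Nat.pos_of_ne_zero hne0)
        obtain ⟨sid, hsid, -⟩ := hcol 0 (by rw [hhead]; exact List.mem_range.mpr (Nat.pos_of_ne_zero hne0))
        rw [List.isEmpty_iff] at hids
        simp [hids] at hsid
      rw [hn0]; rfl
    · rw [if_neg hids]
      rw [List.isEmpty_iff] at hids
      have hlen1 : 1 ≤ seller_ids.length := List.length_pos_iff.mpr hids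
      -- the tournament is the fold of merge over the truncated selected rows
      rw [pv_tournament_eq seller_ids all_sellers n seller_ids.length 0 seller_ids.length
        (by omega) (by omega)]
      have hrows : (List.range' 0 (seller_ids.length - 0)).map (pvRowAt seller_ids all_sellers n) =
          seller_ids.map (fun sid => (rowF sid).take n) := by
        rw [Nat.sub_zero, ← List.range_eq_range']
        apply List.ext_getElem
        · simp
        · intro k h1 h2
          simp only [List.getElem_map, List.getElem_range, pvRowAt]
          rw [PySem.List.pyGet?_natCast, List.getElem?_eq_getElem (by simpa using h2)]
          rfl
      rw [hrows]
      -- rows are all of length n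
      have hrlen : ∀ r ∈ seller_ids.map (fun sid => (rowF sid).take n), r.length = n := by
        intro r hr
        obtain ⟨sid, hsid, rfl⟩ := List.mem_map.mp hr
        simp [List.length_take, Nat.min_eq_left (hlen' sid hsid)]
      obtain ⟨r0, rest, hcons⟩ : ∃ r0 rest, seller_ids.map (fun sid => (rowF sid).take n) = r0 :: rest := by
        cases hc : seller_ids.map (fun sid => (rowF sid).take n) with
        | nil => simp [List.map_eq_nil_iff] at hc; exact absurd hc hids
        | cons a t => exact ⟨a, t, rfl⟩
      rw [hcons]
      have hr0 : r0.length = n := hrlen r0 (by rw [hcons]; simp)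
      have hrest : ∀ r ∈ rest, r.length = n := fun r hr => hrlen r (by rw [hcons]; simp [hr])
      -- B's merged row, summed slot by slot
      have hMlen : (rest.foldl bp_merge r0).length = n := pv_foldl_merge_length rest r0 n hr0 hrest
      show _ = (pvFold1 (r0 :: rest)).sum
      unfold pvFold1
      conv_rhs => rw [pv_sum_eq_range, hMlen]
      refine congrArg List.sum (List.map_congr_left ?_)
      intro i hi
      have hi' : i < n := List.mem_range.mp hi
      obtain ⟨m, hfold, hmin⟩ := hitem i hi'
      rw [hmin]
      -- B's slot i equals m as well
      rw [pv_foldl_merge_getD rest r0 n i hr0 hrest hi']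
      rw [← List.foldl_map (f := fun r : List Int => r.getD i 0) (g := pvF)]
      have hopt : pvOpt ((rest.map (fun r : List Int => r.getD i 0)).foldl pvF (r0.getD i 0)) = some m := by
        rw [pv_opt_foldl, ← List.foldl_map (f := pvOpt) (g := pvOmin)]
        have : ((r0 :: rest).map (fun r : List Int => r.getD i 0)).map pvOpt =
            seller_ids.map (fun sid => pvPriceAt (rowF sid) i) := by
          rw [← hcons, List.map_map, List.map_map]
          apply List.map_congr_left
          intro sid hsid
          simp only [Function.comp]
          have hil : i < (rowF sid).length := lt_of_lt_of_le hi' (hlen' sid hsid)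
          have htl : i < ((rowF sid).take n).length := by
            simp [List.length_take, Nat.min_eq_left (hlen' sid hsid), hi']
          rw [List.getD_eq_getElem _ _ htl, List.getElem_take]
          unfold pvOpt pvPriceAt
          rw [PySem.List.pyGet?_natCast, List.getElem?_eq_getElem hil]
        rw [← this] at hfold
        simp only [List.map_cons] at hfold
        rw [List.foldl_cons] at hfold
        exact hfold
      unfold pvOpt at hopt
      split at hopt
      · rw [Option.some.injEq] at hopt
        rw [hopt]; rfl
      · exact absurd hopt (by simp)

-- ===== VERDICT (by name: the statement is the Claim_ definition above) =====
theorem best_price_spec : Claim_equal_best_price := by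
  intro sids als _ hpre
  exact pv_ports_eq sids als hpre
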